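-- pv_equiv track=rewrite | github.com/aayush06/dsa_practice | matrices/matrix_spiral_traversal.py | matrix_spiral_traversal
-- ===== SOURCE A (Python) =====
-- def matrix_spiral_traversal(matrix):
--     direction = 1 # 1 for left to right and top to bottom scan, -1 for right to left and bottom to up scan
--     row, rows, col, cols = 0, len(matrix), -1, len(matrix[0])
--     traverse = []
--     while rows > 0 and cols > 0:
--         for _ in range(cols):
--             col+=direction
--             traverse.append(matrix[row][col])
--         rows -= 1
--
--         for _ in range(rows):
--             row+=direction
--             traverse.append(matrix[row][col])
--         cols -=1
--
--         direction*=-1 # to reverse direction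
--
--     return traverse
-- ===== SOURCE B (Python) =====
-- def matrix_spiral_traversal(matrix):
--     rows, cols = len(matrix), len(matrix[0])
--     top, bottom, left, right = 0, rows - 1, 0, cols - 1
--     res = []
--     while top <= bottom and left <= right:
--         for c in range(left, right + 1):
--             res.append(matrix[top][c])
--         top += 1
--         for r in range(top, bottom + 1):
--             res.append(matrix[r][right])
--         right -= 1
--         if top <= bottom:
--             for c in range(right, left - 1, -1):
--                 res.append(matrix[bottom][c])
--             bottom -= 1
--         if left <= right:
--             for r in range(bottom, top - 1, -1):
--                 res.append(matrix[r][left])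
--             left += 1
--     return res
-- ===== Notes on version B (the rewrite author's own statement) =====
-- stated objective: simpler
-- what changed: Replaces A's single sign-flipped cursor (direction variable, mutated row/col/rows/cols counters, two counted inner loops per half-turn) with the standard four-boundary decomposition: top/bottom/left/right bounds and four explicit directional passes per layer.
import Mathlib
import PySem

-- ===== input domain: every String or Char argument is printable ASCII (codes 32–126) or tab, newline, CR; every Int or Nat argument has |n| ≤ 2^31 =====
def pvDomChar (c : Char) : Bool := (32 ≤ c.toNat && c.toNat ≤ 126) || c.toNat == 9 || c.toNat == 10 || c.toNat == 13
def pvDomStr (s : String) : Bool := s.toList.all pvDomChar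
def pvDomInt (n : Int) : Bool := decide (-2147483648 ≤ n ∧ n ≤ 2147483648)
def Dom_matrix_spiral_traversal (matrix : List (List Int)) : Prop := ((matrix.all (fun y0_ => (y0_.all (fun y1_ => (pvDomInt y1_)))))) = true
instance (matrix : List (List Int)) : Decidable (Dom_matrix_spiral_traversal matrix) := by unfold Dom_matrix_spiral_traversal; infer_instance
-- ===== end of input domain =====

-- B replaces A's single sign-flipped cursor with the standard four-boundary (top/bottom/left/right)
-- directional-pass decomposition; objective: simpler/idiomatic, same O(rows*cols) cost.

-- ===== PORT A =====
-- matrix[row][col]; totalized with defaults — Pre_ keeps every accessed index in range (Python raises otherwise)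
def pvAGet (m : List (List Int)) (r c : Int) : Int :=
  PySem.List.pyGetD (PySem.List.pyGetD m r []) c 0

-- 'for _ in range(n): col += direction; traverse.append(matrix[row][col])'  (returns final col and list)
def pvAScanCols : Nat → Int → Int → Int → List (List Int) → List Int → Int × List Int
  | 0, _, _, col, _, acc => (col, acc)
  | n+1, dir, row, col, m, acc =>
      pvAScanCols n dir row (col + dir) m (acc ++ [pvAGet m row (col + dir)])

-- 'for _ in range(n): row += direction; traverse.append(matrix[row][col])'  (returns final row and list)
def pvAScanRows : Nat → Int → Int → Int → List (List Int) → List Int → Int × List Int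
  | 0, _, _, row, _, acc => (row, acc)
  | n+1, dir, col, row, m, acc =>
      pvAScanRows n dir col (row + dir) m (acc ++ [pvAGet m (row + dir) col])

-- the 'while rows > 0 and cols > 0' loop of A (fuel only makes the recursion structural;
-- rows + cols strictly decreases each iteration, so the supplied fuel is never exhausted)
def pvALoop : Nat → Int → Int → Int → Int → Int → List (List Int) → List Int → List Int
  | 0, _, _, _, _, _, _, acc => acc
  | fuel+1, dir, row, rows, col, cols, m, acc =>
      if rows > 0 ∧ cols > 0 then
        let s1 := pvAScanCols cols.toNat dir row col m acc
        let s2 := pvAScanRows (rows - 1).toNat dir s1.1 row m s1.2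
        pvALoop fuel (-dir) s2.1 (rows - 1) s1.1 (cols - 1) m s2.2
      else acc

def matrix_spiral_traversal (matrix : List (List Int)) : List Int :=
  pvALoop (matrix.length + (PySem.List.pyGetD matrix 0 []).length + 1)
    1 0 (matrix.length : Int) (-1) ((PySem.List.pyGetD matrix 0 []).length : Int) matrix []

-- ===== PORT B =====
def pvBGet (m : List (List Int)) (r c : Int) : Int :=
  PySem.List.pyGetD (PySem.List.pyGetD m r []) c 0

-- the 'while top <= bottom and left <= right' loop of B (same fuel remark as for A)
def pvBLoop : Nat → Int → Int → Int → Int → List (List Int) → List Int → List Int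
  | 0, _, _, _, _, _, acc => acc
  | fuel+1, top, bottom, left, right, m, acc =>
    if top ≤ bottom ∧ left ≤ right then
    let acc1 := (PySem.List.pyRange left (right + 1) 1).foldl
                  (fun a c => a ++ [pvBGet m top c]) acc
    let top1 := top + 1
    let acc2 := (PySem.List.pyRange top1 (bottom + 1) 1).foldl
                  (fun a r => a ++ [pvBGet m r right]) acc1
    let right1 := right - 1
    if top1 ≤ bottom then
      let acc3 := (PySem.List.pyRange right1 (left - 1) (-1)).foldl
                    (fun a c => a ++ [pvBGet m bottom c]) acc2
      let bottom1 := bottom - 1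
      if left ≤ right1 then
        pvBLoop fuel top1 bottom1 (left + 1) right1 m
          ((PySem.List.pyRange bottom1 (top1 - 1) (-1)).foldl
             (fun a r => a ++ [pvBGet m r left]) acc3)
      else pvBLoop fuel top1 bottom1 left right1 m acc3
    else
      if left ≤ right1 then
        pvBLoop fuel top1 bottom (left + 1) right1 m
          ((PySem.List.pyRange bottom (top1 - 1) (-1)).foldl
             (fun a r => a ++ [pvBGet m r left]) acc2)
      else pvBLoop fuel top1 bottom left right1 m acc2
    else acc

def matrix_spiral_traversal_alt (matrix : List (List Int)) : List Int :=
  pvBLoop (matrix.length + (PySem.List.pyGetD matrix 0 []).length + 1)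
    0 ((matrix.length : Int) - 1) 0 (((PySem.List.pyGetD matrix 0 []).length : Int) - 1) matrix []

-- ===== PRECONDITION & SPEC =====
-- Pre_ excludes exactly the inputs where Python A raises IndexError: the empty matrix
-- (A evaluates matrix[0]) and matrices with a row shorter than the first row (the spiral
-- visits every cell of the len(matrix) × len(matrix[0]) rectangle).
def Pre_matrix_spiral_traversal (matrix : List (List Int)) : Prop :=
  matrix ≠ [] ∧ ∀ row ∈ matrix, (matrix.headD []).length ≤ row.length
instance (matrix : List (List Int)) : Decidable (Pre_matrix_spiral_traversal matrix) := by
  unfold Pre_matrix_spiral_traversal; infer_instance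

def pvWitness_matrix_spiral_traversal : List (List Int) := [[1, 2, 3], [4, 5, 6], [7, 8, 9]]

def Spec_matrix_spiral_traversal (matrix : List (List Int)) (out : List Int) : Prop :=
  out = matrix_spiral_traversal_alt matrix
instance (matrix : List (List Int)) (out : List Int) : Decidable (Spec_matrix_spiral_traversal matrix out) := by
  unfold Spec_matrix_spiral_traversal; infer_instance

-- ===== CLAIM (what is proved, stated in full; the proofs are below) =====
def Claim_equal_matrix_spiral_traversal : Prop := ∀ (matrix : List (List Int)), Dom_matrix_spiral_traversal matrix → Pre_matrix_spiral_traversal matrix → Spec_matrix_spiral_traversal matrix (matrix_spiral_traversal matrix)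

-- ===== LEMMAS AND PROOFS =====

theorem pvGet_eq (m : List (List Int)) (r c : Int) : pvAGet m r c = pvBGet m r c := rfl

-- closed form of A's column scan
theorem pvAScanCols_spec (n : Nat) (dir row col : Int) (m : List (List Int)) (acc : List Int) :
    pvAScanCols n dir row col m acc =
      (col + dir * n, acc ++ (List.range n).map (fun (i : Nat) => pvAGet m row (col + dir * ((i : Int) + 1)))) := by
  induction n generalizing col acc with
  | zero => simp [pvAScanCols]
  | succ k ih =>
      rw [pvAScanCols, ih]
      refine Prod.ext ?_ ?_
      · simp; ring
      · simp only [List.range_succ_eq_map, List.map_cons, List.map_map]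
        simp only [List.append_assoc, List.cons_append, List.nil_append]
        congr 2
        · congr 1; push_cast; ring
        · apply List.map_congr_left; intro i _; simp only [Function.comp_apply]; congr 1; push_cast; ring

-- closed form of A's row scan
theorem pvAScanRows_spec (n : Nat) (dir col row : Int) (m : List (List Int)) (acc : List Int) :
    pvAScanRows n dir col row m acc =
      (row + dir * n, acc ++ (List.range n).map (fun (i : Nat) => pvAGet m (row + dir * ((i : Int) + 1)) col)) := by
  induction n generalizing row acc with
  | zero => simp [pvAScanRows]
  | succ k ih =>
      rw [pvAScanRows, ih]
      refine Prod.ext ?_ ?_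
      · simp; ring
      · simp only [List.range_succ_eq_map, List.map_cons, List.map_map]
        simp only [List.append_assoc, List.cons_append, List.nil_append]
        congr 2
        · congr 1; push_cast; ring
        · apply List.map_congr_left; intro i _; simp only [Function.comp_apply]; congr 1; push_cast; ring

-- an ascending directional pass as B writes it, in A's closed form
theorem seg_asc (a : Int) (n : Nat) (f : Int → Int) :
    (List.range n).map (fun (i : Nat) => f (a + (i : Int) + 1)) = (PySem.List.pyRange (a + 1) (a + 1 + n) 1).map f := by
  rw [PySem.List.pyRange_one, List.map_map]
  have : (a + 1 + (n : Int) - (a + 1)).toNat = n := by omega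
  rw [this]
  apply List.map_congr_left; intro i _; simp only [Function.comp_apply]; congr 1; ring

-- a descending directional pass as B writes it, in A's closed form
theorem seg_desc (a : Int) (n : Nat) (f : Int → Int) :
    (List.range n).map (fun (i : Nat) => f (a - (i : Int) - 1)) = (PySem.List.pyRange (a - 1) (a - 1 - n) (-1)).map f := by
  rw [PySem.List.pyRange_neg_one, List.map_map]
  have : (a - 1 - (a - 1 - (n : Int))).toNat = n := by omega
  rw [this]
  apply List.map_congr_left; intro i _; simp only [Function.comp_apply]; congr 1; ring

-- the core correspondence: A with rectangle [t..b] × [l..r] remaining (direction 1,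
-- cursor at row t / col l-1) computes the same list as B with boundaries (t, b, l, r)
-- B's loop with a false guard returns its accumulator, whatever fuel remains
theorem pvBLoop_stop (nb : Nat) (top bottom left right : Int) (m : List (List Int)) (acc : List Int)
    (h : ¬ (top ≤ bottom ∧ left ≤ right)) : pvBLoop nb top bottom left right m acc = acc := by
  cases nb with
  | zero => rw [pvBLoop]
  | succ k => rw [pvBLoop, if_neg h]

theorem pvLoop_eq (m : List (List Int)) :
    ∀ (N : Nat) (t b l r : Int) (acc : List Int) (Na Nb : Nat),
      (b - t + r - l + 2).toNat ≤ N → (b - t + r - l + 2).toNat < Na → (b - t + r - l + 2).toNat < Nb →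
      pvALoop Na 1 t (b - t + 1) (l - 1) (r - l + 1) m acc = pvBLoop Nb t b l r m acc := by
  intro N
  induction N with
  | zero =>
      intro t b l r acc Na Nb hN hNa hNb
      obtain ⟨na, rfl⟩ : ∃ k, Na = k + 1 := ⟨Na - 1, by omega⟩
      obtain ⟨nb, rfl⟩ : ∃ k, Nb = k + 1 := ⟨Nb - 1, by omega⟩
      rw [pvALoop, pvBLoop, if_neg (by omega), if_neg (by omega)]
  | succ N ih =>
      intro t b l r acc Na Nb hN hNa hNb
      obtain ⟨na, rfl⟩ : ∃ k, Na = k + 1 := ⟨Na - 1, by omega⟩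
      obtain ⟨nb, rfl⟩ : ∃ k, Nb = k + 1 := ⟨Nb - 1, by omega⟩
      by_cases hg : t ≤ b ∧ l ≤ r
      · -- both loops run at least once
        obtain ⟨htb, hlr⟩ := hg
        rw [pvALoop, if_pos (by omega)]
        simp only [pvAScanCols_spec, pvAScanRows_spec, one_mul]
        rw [show (r - l + 1 - 1 : Int) = r - l by ring, show (b - t + 1 - 1 : Int) = b - t by ring]
        have hc : ((r - l + 1).toNat : Int) = r - l + 1 := by omega
        have hrow : ((b - t).toNat : Int) = b - t := by omega
        simp only [hc, hrow]
        rw [show (l - 1 + (r - l + 1) : Int) = r by ring, show (t + (b - t) : Int) = b by ring]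
        -- the two ascending passes of A's first half-turn are B's top-row and right-column passes
        have seg1 : (List.range (r - l + 1).toNat).map (fun (i : Nat) => pvAGet m t (l - 1 + ((i : Int) + 1)))
            = (PySem.List.pyRange l (r + 1) 1).map (fun c => pvBGet m t c) := by
          have := seg_asc (l - 1) (r - l + 1).toNat (fun c => pvAGet m t c)
          simp only [pvGet_eq] at this ⊢
          rw [show (l - 1 + 1 : Int) = l by ring, hc, show (l + (r - l + 1) : Int) = r + 1 by ring] at this
          rw [← this]
          apply List.map_congr_left; intro i _; congr 1; ring
        have seg2 : (List.range (b - t).toNat).map (fun (i : Nat) => pvAGet m (t + ((i : Int) + 1)) r)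
            = (PySem.List.pyRange (t + 1) (b + 1) 1).map (fun ρ => pvBGet m ρ r) := by
          have := seg_asc t (b - t).toNat (fun ρ => pvAGet m ρ r)
          simp only [pvGet_eq] at this ⊢
          rw [hrow, show (t + 1 + (b - t) : Int) = b + 1 by ring] at this
          rw [← this]
          apply List.map_congr_left; intro i _; congr 1; ring
        rw [pvBLoop, if_pos ⟨htb, hlr⟩]
        simp only [PySem.List.foldl_append_singleton_eq_map]
        rw [← seg1, ← seg2]
        set acc2 := acc ++ _ ++ _ with hacc2
        -- second half-turn of A (direction -1) against B's guarded bottom-row / left-column passes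
        obtain ⟨na', rfl⟩ : ∃ k, na = k + 1 := ⟨na - 1, by omega⟩
        by_cases hg2 : b - t > 0 ∧ r - l > 0
        · obtain ⟨h1, h2⟩ := hg2
          rw [pvALoop, if_pos (by omega)]
          simp only [pvAScanCols_spec, pvAScanRows_spec, neg_neg]
          have hc2 : ((r - l).toNat : Int) = r - l := by omega
          have hr2 : ((b - t - 1).toNat : Int) = b - t - 1 := by omega
          simp only [hc2, hr2]
          rw [show (r + -1 * (r - l) : Int) = l by ring, show (b + -1 * (b - t - 1) : Int) = t + 1 by ring]
          have seg3 : (List.range (r - l).toNat).map (fun (i : Nat) => pvAGet m b (r + -1 * ((i : Int) + 1)))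
              = (PySem.List.pyRange (r - 1) (l - 1) (-1)).map (fun c => pvBGet m b c) := by
            have := seg_desc r (r - l).toNat (fun c => pvAGet m b c)
            simp only [pvGet_eq] at this ⊢
            rw [hc2, show (r - 1 - (r - l) : Int) = l - 1 by ring] at this
            rw [← this]
            apply List.map_congr_left; intro i _; congr 1; ring
          have seg4 : (List.range (b - t - 1).toNat).map (fun (i : Nat) => pvAGet m (b + -1 * ((i : Int) + 1)) l)
              = (PySem.List.pyRange (b - 1) t (-1)).map (fun ρ => pvBGet m ρ l) := by
            have := seg_desc b (b - t - 1).toNat (fun ρ => pvAGet m ρ l)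
            simp only [pvGet_eq] at this ⊢
            rw [hr2, show (b - 1 - (b - t - 1) : Int) = t by ring] at this
            rw [← this]
            apply List.map_congr_left; intro i _; congr 1; ring
          rw [if_pos (by omega : t + 1 ≤ b), if_pos (by omega : l ≤ r - 1),
              show (t + 1 - 1 : Int) = t by ring]
          rw [← seg3, ← seg4]
          have := ih (t + 1) (b - 1) (l + 1) (r - 1)
            (acc2 ++ (List.range (r - l).toNat).map (fun (i : Nat) => pvAGet m b (r + -1 * ((i : Int) + 1)))
                  ++ (List.range (b - t - 1).toNat).map (fun (i : Nat) => pvAGet m (b + -1 * ((i : Int) + 1)) l))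
            na' nb (by omega) (by omega) (by omega)
          rw [show (b - 1 - (t + 1) + 1 : Int) = b - t - 1 by ring,
              show (l + 1 - 1 : Int) = l by ring,
              show (r - 1 - (l + 1) + 1 : Int) = r - l - 1 by ring] at this
          exact this
        · -- degenerate remaining rectangle: A stops; B's remaining passes are empty
          rw [pvALoop, if_neg (by omega)]
          rcases (not_and_or.mp hg2) with h1 | h2
          · -- b = t : single remaining row
            rw [if_neg (by omega : ¬ t + 1 ≤ b)]
            by_cases hlr1 : l ≤ r - 1
            · rw [if_pos hlr1]
              rw [PySem.List.pyRange_neg_one_eq_nil (a := b) (b := t + 1 - 1) (by omega)]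
              simp only [List.map_nil, List.append_nil]
              rw [pvBLoop_stop (h := by omega)]
            · rw [if_neg hlr1]
              rw [pvBLoop_stop (h := by omega)]
          · -- r = l : single remaining column
            by_cases htb1 : t + 1 ≤ b
            · rw [if_pos htb1, if_neg (by omega : ¬ l ≤ r - 1)]
              rw [PySem.List.pyRange_neg_one_eq_nil (a := r - 1) (b := l - 1) (by omega)]
              simp only [List.map_nil, List.append_nil]
              rw [pvBLoop_stop (h := by omega)]
            · rw [if_neg htb1, if_neg (by omega : ¬ l ≤ r - 1)]
              rw [pvBLoop_stop (h := by omega)]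
      · rw [pvALoop, pvBLoop, if_neg (by omega), if_neg hg]

-- ===== VERDICT (by name: the statement is the Claim_ definition above) =====
theorem matrix_spiral_traversal_spec : Claim_equal_matrix_spiral_traversal := by
  intro matrix _ _
  unfold Spec_matrix_spiral_traversal matrix_spiral_traversal matrix_spiral_traversal_alt
  have := pvLoop_eq matrix
    (matrix.length + (PySem.List.pyGetD matrix 0 []).length)
    0 ((matrix.length : Int) - 1) 0 (((PySem.List.pyGetD matrix 0 []).length : Int) - 1) []
    (matrix.length + (PySem.List.pyGetD matrix 0 []).length + 1)
    (matrix.length + (PySem.List.pyGetD matrix 0 []).length + 1)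
    (by omega) (by omega) (by omega)
  rw [show ((matrix.length : Int) - 1 - 0 + 1) = (matrix.length : Int) by ring,
      show ((0 : Int) - 1) = (-1 : Int) by ring,
      show (((PySem.List.pyGetD matrix 0 []).length : Int) - 1 - 0 + 1) = ((PySem.List.pyGetD matrix 0 []).length : Int) by ring] at this
  exact this
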